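-- pv_equiv track=rewrite | github.com/tim-vlc/NodeValues-NetworkPerformance | data_generator/data_sample.py | closest_power_of_two
-- ===== SOURCE A (Python) =====
-- import math
--
-- def closest_power_of_two(n):
--     power = 1
--     while power < n:
--         power *= 2
--     if abs(power - n) < abs(power//2 - n):
--         return int(math.log2(power))
--     else:
--         return int(math.log2(power // 2))
-- ===== SOURCE B (Python) =====
-- def closest_power_of_two(n):
--     k = (n - 1).bit_length()
--     upper = 1 << k
--     return k if upper - n < n - (upper >> 1) else k - 1
-- ===== Notes on version B (the rewrite author's own statement) =====
-- stated objective: simpler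
-- what changed: Replaces A's doubling while-loop and float math.log2 calls with the closed-form bit_length of n-1: the exponent of the smallest power of two >= n, adjusted by the same strict comparison that ties to the lower power.
import Mathlib
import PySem

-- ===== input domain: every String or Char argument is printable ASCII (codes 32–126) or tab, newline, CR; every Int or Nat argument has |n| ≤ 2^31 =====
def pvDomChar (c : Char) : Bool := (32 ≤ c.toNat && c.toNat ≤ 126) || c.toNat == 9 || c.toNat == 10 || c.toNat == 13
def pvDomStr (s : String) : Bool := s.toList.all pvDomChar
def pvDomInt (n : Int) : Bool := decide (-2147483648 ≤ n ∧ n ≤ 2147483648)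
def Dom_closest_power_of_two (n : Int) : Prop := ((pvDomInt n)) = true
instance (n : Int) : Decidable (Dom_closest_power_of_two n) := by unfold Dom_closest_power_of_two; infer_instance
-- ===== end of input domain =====

-- B replaces A's doubling loop by the closed-form smallest power of two ≥ n, via (n-1).bit_length()
-- (objective: simpler; equality of return values proved for n ≥ 1, where Python A returns).

-- ===== PORT A =====
-- 'while power < n: power *= 2' — ported with a fuel counter that only makes the
-- same iteration total; fuel n.toNat+1 is never exhausted since power grows by ≥ 1 per step.
def closestLoopAux : Nat → Int → Int → Int
  | 0, _, power => power
  | fuel + 1, n, power => if power < n then closestLoopAux fuel n (power * 2) else power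

-- int(math.log2(m)): ported by hand as repeated halving; exact for the positive powers of two
-- that reach it here (math.log2(0) raises, excluded by Pre_). Fuel m.toNat only makes it total.
def ilog2Aux : Nat → Int → Int
  | 0, _ => 0
  | fuel + 1, m => if m ≤ 1 then 0 else ilog2Aux fuel (m / 2) + 1

def closest_power_of_two (n : Int) : Int :=
  let power := closestLoopAux (n.toNat + 1) n 1
  if |power - n| < |PySem.Int.floordiv power 2 - n| then ilog2Aux power.toNat power
  else ilog2Aux power.toNat (PySem.Int.floordiv power 2)

-- ===== PORT B =====
def closest_power_of_two_alt (n : Int) : Int :=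
  let k := PySem.Int.bitLength (n - 1)     -- (n-1).bit_length()
  let upper : Int := (1:Int) <<< k         -- 1 << k
  if upper - n < n - (upper >>> (1:Nat)) then (k : Int) else (k : Int) - 1

-- ===== PRECONDITION & SPEC =====
-- Pre_ excludes exactly n ≤ 0, where Python A raises ValueError (math.log2(0) after the loop
-- leaves power = 1 and the else branch takes power//2 = 0).
def Pre_closest_power_of_two (n : Int) : Prop := 1 ≤ n
instance (n : Int) : Decidable (Pre_closest_power_of_two n) := by unfold Pre_closest_power_of_two; infer_instance
def pvWitness_closest_power_of_two : Int := 5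

def Spec_closest_power_of_two (n : Int) (out : Int) : Prop := out = closest_power_of_two_alt n
instance (n : Int) (out : Int) : Decidable (Spec_closest_power_of_two n out) := by unfold Spec_closest_power_of_two; infer_instance

-- ===== CLAIM (what is proved, stated in full; the proofs are below) =====
def Claim_equal_closest_power_of_two : Prop := ∀ (n : Int), Dom_closest_power_of_two n → Pre_closest_power_of_two n → Spec_closest_power_of_two n (closest_power_of_two n)

-- ===== LEMMAS AND PROOFS =====

-- once power ≥ n the loop returns power, whatever the fuel
lemma loopAux_stop (fuel : Nat) (n power : Int) (h : ¬ power < n) :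
    closestLoopAux fuel n power = power := by
  cases fuel <;> simp [closestLoopAux, h]

-- with enough fuel the loop result is ≥ n
lemma loopAux_ge (fuel : Nat) (n power : Int) (h1 : 1 ≤ power)
    (hf : (n - power).toNat < fuel) : n ≤ closestLoopAux fuel n power := by
  induction fuel generalizing power with
  | zero => omega
  | succ f ih =>
    simp only [closestLoopAux]
    split_ifs with hlt
    · exact ih (power * 2) (by omega) (by omega)
    · omega

-- the loop only doubles, so the result is power times a power of two
lemma loopAux_pow (fuel : Nat) (n power : Int) :
    ∃ m : Nat, closestLoopAux fuel n power = power * 2 ^ m := by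
  induction fuel generalizing power with
  | zero => exact ⟨0, by simp [closestLoopAux]⟩
  | succ f ih =>
    simp only [closestLoopAux]
    split_ifs with hlt
    · obtain ⟨m, hm⟩ := ih (power * 2)
      exact ⟨m + 1, by rw [hm]; ring⟩
    · exact ⟨0, by simp⟩

-- if the loop iterates at least once, the result is at most 2*(n-1)
lemma loopAux_ub (fuel : Nat) (n power : Int) (h1 : 1 ≤ power) (hlt : power < n)
    (hf : (n - power).toNat < fuel) : closestLoopAux fuel n power ≤ 2 * (n - 1) := by
  induction fuel generalizing power with
  | zero => omega
  | succ f ih =>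
    simp only [closestLoopAux, if_pos hlt]
    by_cases h2 : power * 2 < n
    · exact ih (power * 2) (by omega) h2 (by omega)
    · rw [loopAux_stop f n (power * 2) h2]; omega

-- the hand-ported log2 on powers of two
lemma ilog2Aux_pow (j : Nat) : ∀ fuel : Nat, j < fuel → ilog2Aux fuel ((2:Int) ^ j) = (j : Int) := by
  induction j with
  | zero => intro fuel hf; cases fuel with
    | zero => omega
    | succ f => simp [ilog2Aux]
  | succ j ih =>
    intro fuel hf
    cases fuel with
    | zero => omega
    | succ f =>
      have h2 : ¬ ((2:Int) ^ (j+1) ≤ 1) := by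
        have : (2:Int) ^ 1 ≤ 2 ^ (j+1) := pow_le_pow_right₀ (by norm_num) (by omega)
        norm_num at this ⊢; omega
      have hhalf : (2:Int) ^ (j+1) / 2 = 2 ^ j := by
        rw [pow_succ]; exact Int.mul_ediv_cancel _ (by norm_num)
      simp only [ilog2Aux, if_neg h2, hhalf, ih f (by omega)]
      push_cast; ring

-- monotone powers of two over Int
lemma two_pow_mono (m k : Nat) (h : m ≤ k) : (2:Int) ^ m ≤ 2 ^ k :=
  pow_le_pow_right₀ (by norm_num) h

-- the loop from power = 1 computes exactly 2 ^ bitLength (n-1), for n ≥ 2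
lemma loop_eq_two_pow_bitLength (n : Int) (hn : 2 ≤ n) :
    closestLoopAux (n.toNat + 1) n 1 = 2 ^ PySem.Int.bitLength (n - 1) := by
  set k := PySem.Int.bitLength (n - 1) with hk
  have ha : (n - 1).natAbs = (n - 1).toNat := by omega
  have hub : (n - 1 : Int) < ((2 ^ k : Nat) : Int) := by
    have h := Nat.cast_lt (α := Int) |>.mpr (PySem.Int.lt_two_pow_bitLength (n - 1))
    rwa [Int.natAbs_of_nonneg (by omega : (0:Int) ≤ n - 1)] at h
  push_cast at hub
  have hnle : n ≤ (2:Int) ^ k := by omega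
  have hlbN : 2 ^ (k - 1) ≤ (n - 1).natAbs :=
    PySem.Int.two_pow_bitLength_le (n - 1) (by omega)
  have hlb : ((2 ^ (k - 1) : Nat) : Int) ≤ n - 1 := by
    have h := Nat.cast_le (α := Int) |>.mpr hlbN
    rwa [Int.natAbs_of_nonneg (by omega : (0:Int) ≤ n - 1)] at h
  push_cast at hlb
  have hkpos : 1 ≤ k := by
    by_contra h
    have : k = 0 := by omega
    rw [this] at hnle; norm_num at hnle; omega
  have h2k : (2:Int) ^ k ≤ 2 * (n - 1) := by
    have : (2:Int) ^ k = 2 * 2 ^ (k - 1) := by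
      rw [← pow_succ']; congr 1; omega
    omega
  -- facts about the loop result
  have hge : n ≤ closestLoopAux (n.toNat + 1) n 1 :=
    loopAux_ge _ n 1 (by norm_num) (by omega)
  obtain ⟨m, hm⟩ := loopAux_pow (n.toNat + 1) n 1
  rw [one_mul] at hm
  have hub' : closestLoopAux (n.toNat + 1) n 1 ≤ 2 * (n - 1) :=
    loopAux_ub _ n 1 (by norm_num) (by omega) (by omega)
  rw [hm] at hge hub' ⊢
  congr 1
  by_contra hne
  rcases Nat.lt_or_ge m k with hlt | hge2
  · have : (2:Int) ^ (m + 1) ≤ 2 ^ k := two_pow_mono _ _ (by omega)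
    rw [pow_succ] at this
    have h2km : (2:Int) ^ k = 2 * 2 ^ (k - 1) := by rw [← pow_succ']; congr 1; omega
    omega
  · have hgt : k < m := by omega
    have : (2:Int) ^ (k + 1) ≤ 2 ^ m := two_pow_mono _ _ (by omega)
    rw [pow_succ] at this
    omega

lemma toNat_two_pow (k : Nat) : ((2:Int) ^ k).toNat = 2 ^ k := by
  have : (2:Int) ^ k = ((2 ^ k : Nat) : Int) := by push_cast; ring
  rw [this, Int.toNat_natCast]

-- ===== VERDICT (by name: the statement is the Claim_ definition above) =====
theorem closest_power_of_two_spec : Claim_equal_closest_power_of_two := by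
  intro n _ hpre
  unfold Spec_closest_power_of_two
  by_cases h1 : n = 1
  · subst h1; decide
  have hn : 2 ≤ n := by unfold Pre_closest_power_of_two at hpre; omega
  unfold closest_power_of_two closest_power_of_two_alt
  set k := PySem.Int.bitLength (n - 1) with hk
  have hpow := loop_eq_two_pow_bitLength n hn
  simp only [hpow, ← hk]
  -- bounds on 2^k
  have hub : (n - 1 : Int) < ((2 ^ k : Nat) : Int) := by
    have h := Nat.cast_lt (α := Int) |>.mpr (PySem.Int.lt_two_pow_bitLength (n - 1))
    rwa [Int.natAbs_of_nonneg (by omega : (0:Int) ≤ n - 1)] at h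
  push_cast at hub
  have hnle : n ≤ (2:Int) ^ k := by omega
  have hlbN : 2 ^ (k - 1) ≤ (n - 1).natAbs :=
    PySem.Int.two_pow_bitLength_le (n - 1) (by omega)
  have hlb : ((2 ^ (k - 1) : Nat) : Int) ≤ n - 1 := by
    have h := Nat.cast_le (α := Int) |>.mpr hlbN
    rwa [Int.natAbs_of_nonneg (by omega : (0:Int) ≤ n - 1)] at h
  push_cast at hlb
  have hkpos : 1 ≤ k := by
    by_contra h
    have : k = 0 := by omega
    rw [this] at hnle; norm_num at hnle; omega
  have hhalf : PySem.Int.floordiv ((2:Int) ^ k) 2 = 2 ^ (k - 1) := by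
    rw [PySem.Int.floordiv_eq_ediv_of_pos (by norm_num)]
    rw [show (2:Int) ^ k = 2 ^ (k-1) * 2 by rw [← pow_succ]; congr 1; omega]
    exact Int.mul_ediv_cancel _ (by norm_num)
  have hshl : (1:Int) <<< k = 2 ^ k := by simp [Int.shiftLeft_eq]
  have hshr : ((2:Int) ^ k) >>> (1:Nat) = 2 ^ (k - 1) := by
    simp only [Int.shiftRight_eq_div_pow]
    rw [show (2:Int) ^ k = 2 ^ (k-1) * 2 by rw [← pow_succ]; congr 1; omega]
    norm_num
  have habs1 : |(2:Int) ^ k - n| = 2 ^ k - n := abs_of_nonneg (by omega)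
  have habs2 : |(2:Int) ^ (k - 1) - n| = n - 2 ^ (k - 1) := by
    rw [abs_of_neg (by omega)]; ring
  simp only [hhalf, hshl, hshr, habs1, habs2]
  split_ifs with hc1
  · rw [ilog2Aux_pow k ((2:Int)^k).toNat (by rw [toNat_two_pow]; exact Nat.lt_two_pow_self)]
  · rw [ilog2Aux_pow (k-1) ((2:Int)^k).toNat
      (by rw [toNat_two_pow]; exact lt_of_le_of_lt (by omega) Nat.lt_two_pow_self)]
    push_cast [Nat.cast_sub hkpos]; ring
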